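-- pv_equiv track=rewrite | github.com/JoohyungDev/algorithm | 파이알고_100/자료 구조/데이터_저장_전략.py | solution
-- ===== SOURCE A (Python) =====
-- from collections import deque
--
-- def solution(data):
--     target, my_list = data
--     my_q = deque(maxlen=target)
--     result = []
--     for i in my_list:
--         my_q.append(i)
--         result.append(list(my_q))
--     return result
-- ===== SOURCE B (Python) =====
-- def solution(data):
--     target, my_list = data
--     if target < 0:
--         raise ValueError("maxlen must be non-negative")
--     return [list(my_list[max(0, i - target + 1): i + 1])
--             for i in range(len(my_list))]
-- ===== Notes on version B (the rewrite author's own statement) =====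
-- stated objective: simpler
-- what changed: Replaces the incrementally-maintained bounded deque with a direct comprehension that builds each window by slicing my_list[max(0, i-target+1):i+1]; no mutable structure is carried across iterations. Like A, B raises ValueError on a negative window size (those inputs are outside Pre_).
import Mathlib
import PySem

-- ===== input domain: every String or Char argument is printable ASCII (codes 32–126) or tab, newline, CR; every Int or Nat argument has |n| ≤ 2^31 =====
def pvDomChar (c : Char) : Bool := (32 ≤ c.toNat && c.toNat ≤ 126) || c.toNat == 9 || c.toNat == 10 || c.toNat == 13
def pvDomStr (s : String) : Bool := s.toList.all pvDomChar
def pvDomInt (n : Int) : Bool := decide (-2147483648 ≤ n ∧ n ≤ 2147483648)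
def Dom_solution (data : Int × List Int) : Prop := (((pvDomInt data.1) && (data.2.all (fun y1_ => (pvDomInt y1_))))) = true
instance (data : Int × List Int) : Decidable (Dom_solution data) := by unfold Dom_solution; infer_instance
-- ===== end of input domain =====

-- B drops A's incrementally-maintained bounded deque and builds each window directly by slicing; simpler, same cost. Like A, B raises ValueError on target < 0 (outside Pre_).


-- ===== PORT A =====
-- deque.append with maxlen: append on the right, pop from the left once the bound is exceeded
def dequeStep (target : Int) (st : List Int × List (List Int)) (i : Int) : List Int × List (List Int) :=
  let q2 := st.1 ++ [i]
  let q := if (q2.length : Int) > target then q2.drop 1 else q2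
  (q, st.2 ++ [q])

def solution (data : Int × List Int) : List (List Int) :=
  (data.2.foldl (dequeStep data.1) ([], [])).2

-- ===== PORT B =====
-- the 'raise ValueError' branch of Source B (target < 0) lies outside Pre_; it is rendered as []
def solution_alt (data : Int × List Int) : List (List Int) :=
  if data.1 < 0 then []
  else
    (PySem.List.pyRange 0 (data.2.length : Int) 1).map
      (fun i => PySem.List.slice data.2 (some (max 0 (i - data.1 + 1))) (some (i + 1)))

-- ===== PRECONDITION & SPEC =====
-- Pre_ excludes target < 0, on which A raises ValueError at deque(maxlen=target) (and B raises too).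
def Pre_solution (data : Int × List Int) : Prop := 0 ≤ data.1
instance (data : Int × List Int) : Decidable (Pre_solution data) := by unfold Pre_solution; infer_instance
def pvWitness_solution : (Int × List Int) := (2, [1, 2, 3])

def Spec_solution (data : Int × List Int) (out : List (List Int)) : Prop := out = solution_alt data
instance (data : Int × List Int) (out : List (List Int)) : Decidable (Spec_solution data out) := by unfold Spec_solution; infer_instance

-- ===== CLAIM (what is proved, stated in full; the proofs are below) =====
def Claim_equal_solution : Prop := ∀ (data : Int × List Int), Dom_solution data → Pre_solution data → Spec_solution data (solution data)

-- ===== LEMMAS AND PROOFS =====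

-- the last min(t, |p|) elements of p: the deque content after feeding p through a deque with maxlen t
def dqTail (t : Int) (p : List Int) : List Int := p.drop (p.length - t.toNat)

lemma dequeStep_fst (t : Int) (ht : 0 ≤ t) (p : List Int) (res : List (List Int)) (i : Int) :
    (dequeStep t (dqTail t p, res) i).1 = dqTail t (p ++ [i]) := by
  show (let q2 := dqTail t p ++ [i];
        if (q2.length : Int) > t then q2.drop 1 else q2) = dqTail t (p ++ [i])
  simp only [dqTail, List.length_append, List.length_drop, List.length_cons, List.length_nil,
    Nat.zero_add]
  set m := t.toNat with hm
  have htm : (m : Int) = t := Int.toNat_of_nonneg ht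
  set n := p.length with hn
  rcases Nat.eq_zero_or_pos m with h0 | h0
  · rw [if_pos (by push_cast; omega)]
    have e1 : n - m = n := by omega
    have e2 : n + 1 - m = n + 1 := by omega
    rw [e1, e2, List.drop_append, List.drop_drop]
    have e5 : (List.drop n p).length = 0 := by simp; omega
    have e6 : n + 1 - n = 1 := by omega
    rw [e5, List.drop_append, e6]
  · by_cases h : m ≤ n
    · rw [if_pos (by push_cast; omega)]
      rw [List.drop_append, List.drop_append, List.drop_drop]
      simp only [List.length_drop, ← hn]
      have e1 : n - m + 1 = n + 1 - m := by omega
      have e2 : 1 - (n - (n - m)) = 0 := by omega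
      have e3 : n + 1 - m - n = 0 := by omega
      rw [e1, e2, e3]
    · rw [if_neg (by push_cast; omega)]
      have e1 : n - m = 0 := by omega
      have e2 : n + 1 - m = 0 := by omega
      rw [e1, e2]
      simp

lemma dequeStep_eq (t : Int) (ht : 0 ≤ t) (p : List Int) (res : List (List Int)) (i : Int) :
    dequeStep t (dqTail t p, res) i = (dqTail t (p ++ [i]), res ++ [dqTail t (p ++ [i])]) := by
  have h1 := dequeStep_fst t ht p res i
  simp only [dequeStep] at h1 ⊢
  rw [h1]

lemma loopA (t : Int) (ht : 0 ≤ t) :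
    ∀ (l p : List Int) (res : List (List Int)),
    (l.foldl (dequeStep t) (dqTail t p, res)).2
      = res ++ (List.range l.length).map (fun j => dqTail t (p ++ l.take (j + 1))) := by
  intro l
  induction l with
  | nil => intro p res; simp
  | cons i l ih =>
    intro p res
    rw [List.foldl_cons, dequeStep_eq t ht p res i, ih (p ++ [i])]
    rw [List.length_cons, List.range_succ_eq_map]
    simp [List.append_assoc, Function.comp]

lemma win_eq (t : Int) (ht : 0 ≤ t) (l : List Int) (k : Nat) (hk : k < l.length) :
    PySem.List.slice l (some (max 0 ((k : Int) - t + 1))) (some ((k : Int) + 1))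
      = dqTail t (l.take (k + 1)) := by
  rw [PySem.List.slice_toNat l (by omega) (by omega)]
  simp only [dqTail, List.length_take]
  have ha : (max 0 ((k : Int) - t + 1)).toNat = (k + 1) - t.toNat := by omega
  have hb : ((k : Int) + 1).toNat = k + 1 := by omega
  have hc : min (k + 1) l.length = k + 1 := by omega
  rw [ha, hb, hc, List.drop_take]

-- ===== VERDICT (by name: the statement is the Claim_ definition above) =====
theorem solution_spec : Claim_equal_solution := by
  intro data hdom hpre
  obtain ⟨t, l⟩ := data
  have ht : 0 ≤ t := hpre
  unfold Spec_solution solution solution_alt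
  rw [if_neg (by omega)]
  have h0 : dqTail t [] = [] := by simp [dqTail]
  have := loopA t ht l [] []
  rw [h0] at this
  rw [this]
  simp only [List.nil_append]
  rw [PySem.List.pyRange_one]
  rw [List.map_map]
  simp only [Int.sub_zero, Int.toNat_natCast]
  apply List.map_congr_left
  intro k hk
  simp only [Function.comp_apply, Int.zero_add]
  rw [win_eq t ht l k (List.mem_range.mp hk)]
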